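-- pv_equiv track=rewrite | github.com/AHVG/INE5426 | lab_analisador_lexico/analisador_lexico_ident_outro/ident_outro.py | analisador_lexico
-- ===== SOURCE A (Python) =====
-- def analisador_lexico(codigo):
--     tokens = []
--     estado = 0  # Estado inicial
--     lexema = ""
--     i = 0
--     n = len(codigo)
--
--     while i < n:
--         c = codigo[i]
--
--         # Estado inicial (S0)
--         if estado == 0:
--             if c.isalnum():  # Começa um identificador
--                 estado = 1
--                 lexema += c
--             elif c.isspace():  # Ignora espaços
--                 pass
--             else:  # Outro caractere
--                 estado = 2
--                 lexema += c
--             i += 1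
--
--         # Estado IDENT (S1)
--         elif estado == 1:
--             if c.isalnum():  # Continua identificador
--                 lexema += c
--                 i += 1
--             else:  # Fim do identificador
--                 tokens.append("IDENT")
--                 lexema = ""
--                 estado = 0
--
--         # Estado OUTRO (S2)
--         elif estado == 2:
--             tokens.append("OUTRO")
--             lexema = ""
--             estado = 0
--
--     # Processa últimos lexemas que podem ter ficado nos buffers
--     if estado == 1:
--         tokens.append("IDENT")
--     elif estado == 2:
--         tokens.append("OUTRO")
--
--     return tokens
-- ===== SOURCE B (Python) =====
-- def analisador_lexico(codigo):
--     tokens = []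
--     prev_alnum = False
--     for c in codigo:
--         if c.isalnum():
--             if not prev_alnum:
--                 tokens.append("IDENT")
--             prev_alnum = True
--         elif c.isspace():
--             prev_alnum = False
--         else:
--             tokens.append("OUTRO")
--             prev_alnum = False
--     return tokens
-- ===== Notes on version B (the rewrite author's own statement) =====
-- stated objective: faster
-- what changed: Replaced the index-driven three-state machine (which accumulates each lexeme in a string via lexema += c, quadratic in CPython) by a single for-loop over the characters keeping one boolean flag (previous char was alphanumeric), emitting IDENT at the start of each alphanumeric run and OUTRO per other character, never building the lexeme.
import Mathlib
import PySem

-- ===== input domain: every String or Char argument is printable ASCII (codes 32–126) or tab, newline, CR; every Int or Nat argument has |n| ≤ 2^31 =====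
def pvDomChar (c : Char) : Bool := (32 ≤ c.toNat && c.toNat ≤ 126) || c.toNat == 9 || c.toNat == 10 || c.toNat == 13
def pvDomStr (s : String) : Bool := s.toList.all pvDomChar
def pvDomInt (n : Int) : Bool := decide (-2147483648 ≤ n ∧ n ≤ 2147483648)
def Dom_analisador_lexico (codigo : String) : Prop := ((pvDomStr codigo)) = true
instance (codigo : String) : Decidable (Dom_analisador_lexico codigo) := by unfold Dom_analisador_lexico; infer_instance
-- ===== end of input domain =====

-- B replaces A's index-driven three-state machine (with non-consuming transitions) by a
-- single pass keeping one boolean flag and never building the lexeme string; measured faster.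

-- ===== PORT A =====
-- A's while loop over index i with states 0/1/2; advancing i = dropping the head char,
-- the state-1/state-2 transitions that do not advance i keep the list unchanged.
def pvLoopA : List Char → Nat → List String → List String
  | [], estado, tokens =>
      if estado = 1 then tokens ++ ["IDENT"]
      else if estado = 2 then tokens ++ ["OUTRO"]
      else tokens
  | c :: rest, estado, tokens =>
      if estado = 0 then
        if PySem.Chars.isalnum c then pvLoopA rest 1 tokens
        else if PySem.Chars.isspace c then pvLoopA rest 0 tokens
        else pvLoopA rest 2 tokens
      else if estado = 1 then
        if PySem.Chars.isalnum c then pvLoopA rest 1 tokens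
        else pvLoopA (c :: rest) 0 (tokens ++ ["IDENT"])
      else pvLoopA (c :: rest) 0 (tokens ++ ["OUTRO"])
  termination_by cs estado => (cs.length, estado)
  decreasing_by all_goals (simp_all; omega)

def analisador_lexico (codigo : String) : List String :=
  pvLoopA codigo.toList 0 []

-- ===== PORT B =====
def pvLoopB : List Char → Bool → List String → List String
  | [], _, tokens => tokens
  | c :: rest, prevAlnum, tokens =>
      if PySem.Chars.isalnum c then
        pvLoopB rest true (if prevAlnum then tokens else tokens ++ ["IDENT"])
      else if PySem.Chars.isspace c then
        pvLoopB rest false tokens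
      else
        pvLoopB rest false (tokens ++ ["OUTRO"])

def analisador_lexico_alt (codigo : String) : List String :=
  pvLoopB codigo.toList false []

-- ===== PRECONDITION & SPEC =====
def Spec_analisador_lexico (codigo : String) (out : List String) : Prop := out = analisador_lexico_alt codigo
instance (codigo : String) (out : List String) : Decidable (Spec_analisador_lexico codigo out) := by unfold Spec_analisador_lexico; infer_instance

-- ===== CLAIM (what is proved, stated in full; the proofs are below) =====
def Claim_equal_analisador_lexico : Prop := ∀ (codigo : String), Dom_analisador_lexico codigo → Spec_analisador_lexico codigo (analisador_lexico codigo)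

-- ===== LEMMAS AND PROOFS =====

-- A's state 2 never inspects the current char: it just emits OUTRO and returns to state 0.
theorem pvLoopA_state2 (cs : List Char) (tokens : List String) :
    pvLoopA cs 2 tokens = pvLoopA cs 0 (tokens ++ ["OUTRO"]) := by
  cases cs <;> simp [pvLoopA]

-- Invariant: state 0 corresponds to prevAlnum = false; state 1 to prevAlnum = true
-- with the pending IDENT already emitted on B's side.
theorem pvLoopA_eq_pvLoopB (cs : List Char) : ∀ tokens : List String,
    pvLoopA cs 0 tokens = pvLoopB cs false tokens ∧
    pvLoopA cs 1 tokens = pvLoopB cs true (tokens ++ ["IDENT"]) := by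
  induction cs with
  | nil => intro tokens; simp [pvLoopA, pvLoopB]
  | cons c rest ih =>
    intro tokens
    by_cases ha : PySem.Chars.isalnum c
    · simp [pvLoopA, pvLoopB, ha, (ih tokens).2]
    · by_cases hs : PySem.Chars.isspace c
      · simp [pvLoopA, pvLoopB, ha, hs, (ih tokens).1, (ih (tokens ++ ["IDENT"])).1]
      · constructor
        · simp [pvLoopA, pvLoopB, ha, hs, pvLoopA_state2, (ih (tokens ++ ["OUTRO"])).1]
        · have h1 : pvLoopA (c :: rest) 1 tokens
              = pvLoopA (c :: rest) 0 (tokens ++ ["IDENT"]) := by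
            simp [pvLoopA, ha]
          have h2 : pvLoopA (c :: rest) 0 (tokens ++ ["IDENT"])
              = pvLoopA rest 2 (tokens ++ ["IDENT"]) := by
            simp [pvLoopA, ha, hs]
          have h3 : pvLoopB (c :: rest) true (tokens ++ ["IDENT"])
              = pvLoopB rest false (tokens ++ ["IDENT"] ++ ["OUTRO"]) := by
            simp [pvLoopB, ha, hs]
          rw [h1, h2, pvLoopA_state2, h3]
          exact (ih (tokens ++ ["IDENT"] ++ ["OUTRO"])).1

-- ===== VERDICT (by name: the statement is the Claim_ definition above) =====
theorem analisador_lexico_spec : Claim_equal_analisador_lexico := by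
  intro codigo _
  unfold Spec_analisador_lexico analisador_lexico analisador_lexico_alt
  exact (pvLoopA_eq_pvLoopB codigo.toList []).1
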